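-- pv_equiv track=rewrite | github.com/EMBKSM/Algorithms | Python3/프로그래머스/0/181893. 배열 조각하기/배열 조각하기.py | solution
-- ===== SOURCE A (Python) =====
-- def solution(arr, query):
--     num = 0
--     list_1 = arr
--     for i in query:
--         if num % 2 == 0:
--             list_1 = list_1[:i+1]
--             num += 1
--         else:
--             list_1 = list_1[i:]
--             num += 1
--     return list_1
-- ===== SOURCE B (Python) =====
-- def solution(arr, query):
--     # Track the surviving window [lo, hi) of the original array and slice once.
--     lo, hi = 0, len(arr)
--     even = True
--     for i in query:
--         L = hi - lo
--         j = i + 1 if even else i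
--         if j < 0:
--             j += L
--         j = 0 if j < 0 else (L if j > L else j)
--         if even:
--             hi = lo + j
--         else:
--             lo = lo + j
--         even = not even
--     return arr[lo:hi]
-- ===== Notes on version B (the rewrite author's own statement) =====
-- stated objective: alternative
-- what changed: Instead of materialising a new list slice per query, B only tracks the low/high bounds of the surviving contiguous window (with Python's negative-index/clamping rules applied arithmetically) and slices the original array once at the end.
import Mathlib
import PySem

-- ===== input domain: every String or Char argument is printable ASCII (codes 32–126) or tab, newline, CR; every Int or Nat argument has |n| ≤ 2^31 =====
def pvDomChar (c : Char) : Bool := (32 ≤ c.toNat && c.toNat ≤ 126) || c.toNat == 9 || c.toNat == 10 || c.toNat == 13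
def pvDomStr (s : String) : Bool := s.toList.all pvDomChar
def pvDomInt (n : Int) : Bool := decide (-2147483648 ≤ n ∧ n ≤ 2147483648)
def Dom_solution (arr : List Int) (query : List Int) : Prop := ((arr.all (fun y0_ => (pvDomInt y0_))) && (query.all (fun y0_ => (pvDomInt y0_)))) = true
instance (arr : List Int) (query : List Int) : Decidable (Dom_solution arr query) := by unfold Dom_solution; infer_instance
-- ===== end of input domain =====

-- B replaces A's per-query list re-slicing by tracking the window's low/high bounds and slicing once at the end.

-- ===== PORT A =====
def solution (arr : List Int) (query : List Int) : List Int :=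
  (query.foldl
    (fun (s : Int × List Int) i =>
      if s.1 % 2 == 0 then (s.1 + 1, PySem.List.slice s.2 none (some (i + 1)))
      else (s.1 + 1, PySem.List.slice s.2 (some i) none))
    (0, arr)).2

-- ===== PORT B =====
-- one step of B's loop: update (lo, hi, even) for query value i
def solAltStep (s : Int × Int × Bool) (i : Int) : Int × Int × Bool :=
  let lo := s.1; let hi := s.2.1; let even := s.2.2
  let L := hi - lo
  let j0 : Int := if even then i + 1 else i
  let j1 : Int := if j0 < 0 then j0 + L else j0
  let j : Int := if j1 < 0 then 0 else if j1 > L then L else j1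
  if even then (lo, lo + j, false) else (lo + j, hi, true)

def solution_alt (arr : List Int) (query : List Int) : List Int :=
  let s := query.foldl solAltStep (0, (arr.length : Int), true)
  PySem.List.slice arr (some s.1) (some s.2.1)

-- ===== PRECONDITION & SPEC =====
def Spec_solution (arr : List Int) (query : List Int) (out : List Int) : Prop := out = solution_alt arr query
instance (arr : List Int) (query : List Int) (out : List Int) : Decidable (Spec_solution arr query out) := by unfold Spec_solution; infer_instance

-- ===== CLAIM (what is proved, stated in full; the proofs are below) =====
def Claim_equal_solution : Prop := ∀ (arr : List Int) (query : List Int), Dom_solution arr query → Spec_solution arr query (solution arr query)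

-- ===== LEMMAS AND PROOFS =====

-- A's step function, for readability in the proofs
def solStepA (s : Int × List Int) (i : Int) : Int × List Int :=
  if s.1 % 2 == 0 then (s.1 + 1, PySem.List.slice s.2 none (some (i + 1)))
  else (s.1 + 1, PySem.List.slice s.2 (some i) none)

lemma solution_eq_foldl (arr query : List Int) :
    solution arr query = (query.foldl solStepA (0, arr)).2 := rfl

-- B's clamped index equals PySem's clampIdx on a window of length L
lemma solAlt_j_eq (L v : Int) (hL : 0 ≤ L) :
    (let j1 : Int := if v < 0 then v + L else v
     if j1 < 0 then (0 : Int) else if j1 > L then L else j1)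
    = (PySem.List.clampIdx L.toNat v : Int) := by
  simp only [PySem.List.clampIdx]
  split_ifs <;> push_cast <;> omega

lemma slice_take (l : List Int) (b : Int) :
    PySem.List.slice l none (some b) = l.take (PySem.List.clampIdx l.length b) := by
  simp [PySem.List.slice]

lemma slice_drop (l : List Int) (a : Int) :
    PySem.List.slice l (some a) none = l.drop (PySem.List.clampIdx l.length a) := by
  have h : l.length - PySem.List.clampIdx l.length a ≥ (l.drop (PySem.List.clampIdx l.length a)).length := by
    simp
  simp [PySem.List.slice, List.take_of_length_le h]

lemma clampIdx_le' (n : Nat) (v : Int) : PySem.List.clampIdx n v ≤ n := by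
  simp [PySem.List.clampIdx]; split_ifs <;> omega

lemma slice_window (l : List Int) (a b : Int) (h0 : 0 ≤ a) (h1 : a ≤ b) (h2 : b ≤ l.length) :
    PySem.List.slice l (some a) (some b) = (l.drop a.toNat).take (b - a).toNat := by
  have ha : PySem.List.clampIdx l.length a = a.toNat := by
    simp only [PySem.List.clampIdx]; split_ifs <;> omega
  have hb : PySem.List.clampIdx l.length b = b.toNat := by
    simp only [PySem.List.clampIdx]; split_ifs <;> omega
  simp only [PySem.List.slice, ha, hb]
  congr 1
  omega

-- the invariant step: A's list component is the window [lo, hi) of arr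
lemma main_invariant (query : List Int) :
    ∀ (arr : List Int) (num lo hi : Int) (even : Bool),
    even = (num % 2 == 0) → 0 ≤ lo → lo ≤ hi → hi ≤ arr.length →
    let sB := query.foldl solAltStep (lo, hi, even)
    0 ≤ sB.1 ∧ sB.1 ≤ sB.2.1 ∧ sB.2.1 ≤ arr.length ∧
    (query.foldl solStepA (num, (arr.drop lo.toNat).take (hi - lo).toNat)).2
      = (arr.drop sB.1.toNat).take (sB.2.1 - sB.1).toNat := by
  induction query with
  | nil =>
    intro arr num lo hi even _ h0 h1 h2
    exact ⟨h0, h1, h2, rfl⟩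
  | cons i rest ih =>
    intro arr num lo hi even hev h0 h1 h2
    simp only [List.foldl_cons]
    have hlen : ((arr.drop lo.toNat).take (hi - lo).toNat).length = (hi - lo).toNat := by
      simp; omega
    by_cases he : num % 2 = 0
    · -- even step: take
      have hevt : even = true := by simp [hev, he]
      have hstepA : solStepA (num, (arr.drop lo.toNat).take (hi - lo).toNat) i
          = (num + 1, ((arr.drop lo.toNat).take (hi - lo).toNat).take
              (PySem.List.clampIdx (hi - lo).toNat (i + 1))) := by
        simp [solStepA, he, slice_take, hlen]
      set j : Int := (PySem.List.clampIdx (hi - lo).toNat (i + 1) : Int) with hj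
      have hjnn : 0 ≤ j := by positivity
      have hjle : j ≤ hi - lo := by
        have := clampIdx_le' (hi - lo).toNat (i + 1)
        omega
      have hstepB : solAltStep (lo, hi, even) i = (lo, lo + j, false) := by
        simp only [solAltStep, hevt, if_pos, if_true]
        have := solAlt_j_eq (hi - lo) (i + 1) (by omega)
        simp only at this ⊢
        rw [this]
      have hwin : ((arr.drop lo.toNat).take (hi - lo).toNat).take
            (PySem.List.clampIdx (hi - lo).toNat (i + 1))
          = (arr.drop lo.toNat).take ((lo + j) - lo).toNat := by
        rw [List.take_take]
        congr 1
        omega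
      rw [hstepA, hstepB, hwin]
      have := ih arr (num + 1) lo (lo + j) false (by simp [Int.add_mul_emod_self_left, he]; omega)
        h0 (by omega) (by omega)
      exact this
    · -- odd step: drop
      have hevf : even = false := by simp [hev, he]
      have hstepA : solStepA (num, (arr.drop lo.toNat).take (hi - lo).toNat) i
          = (num + 1, ((arr.drop lo.toNat).take (hi - lo).toNat).drop
              (PySem.List.clampIdx (hi - lo).toNat i)) := by
        simp [solStepA, he, slice_drop, hlen]
      set j : Int := (PySem.List.clampIdx (hi - lo).toNat i : Int) with hj
      have hjnn : 0 ≤ j := by positivity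
      have hjle : j ≤ hi - lo := by
        have := clampIdx_le' (hi - lo).toNat i
        omega
      have hstepB : solAltStep (lo, hi, even) i = (lo + j, hi, true) := by
        simp only [solAltStep, hevf, if_neg, Bool.false_eq_true, if_false]
        have := solAlt_j_eq (hi - lo) i (by omega)
        simp only at this ⊢
        rw [this]
      have hwin : ((arr.drop lo.toNat).take (hi - lo).toNat).drop
            (PySem.List.clampIdx (hi - lo).toNat i)
          = (arr.drop (lo + j).toNat).take (hi - (lo + j)).toNat := by
        rw [List.drop_take, List.drop_drop]
        congr 1
        · omega
        · congr 1; omega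
      rw [hstepA, hstepB, hwin]
      have := ih arr (num + 1) (lo + j) hi true (by simp; omega)
        (by omega) (by omega) h2
      exact this

-- ===== VERDICT (by name: the statement is the Claim_ definition above) =====
theorem solution_spec : Claim_equal_solution := by
  unfold Claim_equal_solution Spec_solution
  intro arr query _
  have h := main_invariant query arr 0 0 (arr.length : Int) true (by decide) (by omega)
    (by positivity) (le_refl _)
  simp only at h
  obtain ⟨h0, h1, h2, h3⟩ := h
  rw [solution_eq_foldl]
  show _ = PySem.List.slice arr (some (query.foldl solAltStep (0, (arr.length : Int), true)).1)
    (some (query.foldl solAltStep (0, (arr.length : Int), true)).2.1)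
  set sB := query.foldl solAltStep (0, (arr.length : Int), true)
  have harr : (arr.drop (0:Int).toNat).take (((arr.length : Int)) - 0).toNat = arr := by
    simp
  rw [harr] at h3
  rw [h3, slice_window arr sB.1 sB.2.1 h0 h1 h2]
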